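-- pv_equiv track=rewrite | github.com/Smallzoo-dev/python-algorithm-study | homework/1011_fly_me_to_the_alpha_centauri.py | get_left_year_by_max_speed
-- ===== SOURCE A (Python) =====
-- def get_left_year_by_max_speed(left_distance, max_speed):
--     year_counter = 0
--     current_left_distance = left_distance
--     while max_speed >= 1:
--         if max_speed > left_distance:
--             max_speed -= 1
--             continue
--         elif current_left_distance % max_speed == 0:
--             year_counter += (current_left_distance // max_speed)
--             break
--         else:
--             year_counter += (current_left_distance // max_speed)
--             current_left_distance = current_left_distance % max_speed
--             max_speed -= 1
--
--     return year_counter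
-- ===== SOURCE B (Python) =====
-- def get_left_year_by_max_speed(left_distance, max_speed):
--     if left_distance <= 0 or max_speed <= 0:
--         return 0
--     speed = min(max_speed, left_distance)
--     return -(-left_distance // speed)
-- ===== Notes on version B (the rewrite author's own statement) =====
-- stated objective: faster
-- what changed: Replaces the decrement-speed loop with the closed form ceil(left_distance / min(max_speed, left_distance)) (0 for non-positive inputs).
import Mathlib
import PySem

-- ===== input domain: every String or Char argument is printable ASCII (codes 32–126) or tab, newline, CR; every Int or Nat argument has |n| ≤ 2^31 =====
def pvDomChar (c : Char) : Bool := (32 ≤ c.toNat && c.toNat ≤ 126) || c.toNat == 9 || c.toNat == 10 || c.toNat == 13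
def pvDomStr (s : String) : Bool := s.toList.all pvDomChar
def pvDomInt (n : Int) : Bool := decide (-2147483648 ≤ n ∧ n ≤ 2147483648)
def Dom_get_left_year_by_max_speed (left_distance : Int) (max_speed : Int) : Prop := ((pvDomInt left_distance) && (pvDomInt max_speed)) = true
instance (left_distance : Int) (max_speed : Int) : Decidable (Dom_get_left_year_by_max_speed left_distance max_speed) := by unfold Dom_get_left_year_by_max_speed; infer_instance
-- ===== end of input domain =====

-- B replaces A's decrement loop with the closed form ceil(left / min(max_speed,left)); objective: faster (O(1) vs O(max_speed)).

-- ===== PORT A =====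
def goA (left_distance max_speed year cur : Int) : Int :=
  if 1 ≤ max_speed then
    if left_distance < max_speed then
      goA left_distance (max_speed - 1) year cur
    else if PySem.Int.mod cur max_speed = 0 then
      year + PySem.Int.floordiv cur max_speed
    else
      goA left_distance (max_speed - 1) (year + PySem.Int.floordiv cur max_speed)
        (PySem.Int.mod cur max_speed)
  else year
termination_by max_speed.toNat
decreasing_by all_goals omega

def get_left_year_by_max_speed (left_distance : Int) (max_speed : Int) : Int :=
  goA left_distance max_speed 0 left_distance

-- ===== PORT B =====
def get_left_year_by_max_speed_alt (left_distance : Int) (max_speed : Int) : Int :=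
  if left_distance ≤ 0 ∨ max_speed ≤ 0 then 0
  else -(PySem.Int.floordiv (-left_distance) (min max_speed left_distance))

-- ===== PRECONDITION & SPEC =====
def Spec_get_left_year_by_max_speed (left_distance : Int) (max_speed : Int) (out : Int) : Prop := out = get_left_year_by_max_speed_alt left_distance max_speed
instance (left_distance : Int) (max_speed : Int) (out : Int) : Decidable (Spec_get_left_year_by_max_speed left_distance max_speed out) := by unfold Spec_get_left_year_by_max_speed; infer_instance

-- ===== CLAIM (what is proved, stated in full; the proofs are below) =====
def Claim_equal_get_left_year_by_max_speed : Prop := ∀ (left_distance : Int) (max_speed : Int), Dom_get_left_year_by_max_speed left_distance max_speed → Spec_get_left_year_by_max_speed left_distance max_speed (get_left_year_by_max_speed left_distance max_speed)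

-- ===== LEMMAS AND PROOFS =====

-- A returns year unchanged once left_distance is non-positive (the first branch always fires)
lemma goA_nonpos (n : Nat) : ∀ (l ms year cur : Int), ms.toNat ≤ n → l ≤ 0 →
    goA l ms year cur = year := by
  induction n with
  | zero =>
    intro l ms year cur hn hl
    rw [goA]; rw [if_neg (by omega)]
  | succ n ih =>
    intro l ms year cur hn hl
    rw [goA]
    by_cases h1 : 1 ≤ ms
    · rw [if_pos h1, if_pos (by omega)]
      exact ih l (ms - 1) year cur (by omega) hl
    · rw [if_neg h1]

-- phase 1: the speed is decremented down to left_distance without changing anything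
lemma goA_phase1 (n : Nat) : ∀ (l ms year cur : Int), ms.toNat ≤ n → 1 ≤ l → l ≤ ms →
    goA l ms year cur = goA l l year cur := by
  induction n with
  | zero => intro l ms year cur hn hl hlm; omega
  | succ n ih =>
    intro l ms year cur hn hl hlm
    by_cases he : ms = l
    · rw [he]
    · rw [goA, if_pos (by omega), if_pos (by omega)]
      exact ih l (ms - 1) year cur (by omega) hl (by omega)

-- tail: with 1 ≤ cur ≤ ms ≤ l the loop contributes exactly one more year
lemma goA_tail (n : Nat) : ∀ (l ms year cur : Int), ms.toNat ≤ n →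
    1 ≤ cur → cur ≤ ms → ms ≤ l → goA l ms year cur = year + 1 := by
  induction n with
  | zero => intro l ms year cur hn h1 h2 h3; exact absurd hn (by omega)
  | succ n ih =>
    intro l ms year cur hn h1 h2 h3
    rw [goA, if_pos (by omega), if_neg (by omega)]
    by_cases he : cur = ms
    · subst he
      have hfd : PySem.Int.floordiv cur cur = 1 :=
        (PySem.Int.floordiv_eq_iff_of_pos (by omega)).2
          ⟨by nlinarith, by nlinarith⟩
      rw [if_pos (by simp [PySem.Int.mod_eq_zero_iff_dvd]), hfd]
    · have hm : PySem.Int.mod cur ms = cur := by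
        rw [PySem.Int.mod_eq_emod_of_pos (show (0:Int) < ms by omega)]
        exact Int.emod_eq_of_lt (by omega) (by omega)
      have hfd : PySem.Int.floordiv cur ms = 0 :=
        (PySem.Int.floordiv_eq_iff_of_pos (by omega)).2
          ⟨by nlinarith, by omega⟩
      rw [if_neg (by rw [hm]; omega), hm, hfd, add_zero]
      exact ih l (ms - 1) year cur (by omega) h1 (by omega) (by omega)

-- from speed = min(max_speed, l): one division step, then the tail
lemma goA_main (l s : Int) (_hl : 1 ≤ l) (hs1 : 1 ≤ s) (hsl : s ≤ l) :
    goA l s 0 l = -(PySem.Int.floordiv (-l) s) := by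
  have hdm := PySem.Int.floordiv_mul_add_mod l s
  have hmnn := PySem.Int.mod_nonneg l (b := s) (by omega)
  have hmlt := PySem.Int.mod_lt l (b := s) (by omega)
  rw [goA, if_pos (by omega), if_neg (by omega)]
  by_cases hd : PySem.Int.mod l s = 0
  · rw [if_pos hd]
    have hq : -(PySem.Int.floordiv (-l) s) = PySem.Int.floordiv l s :=
      (PySem.Int.neg_floordiv_neg_eq_iff_of_pos (by omega)).2
        (by constructor <;> nlinarith)
    rw [hq]; omega
  · rw [if_neg hd]
    have hm1 : 1 ≤ PySem.Int.mod l s := by omega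
    rw [goA_tail (s - 1).toNat l (s - 1) (0 + PySem.Int.floordiv l s)
      (PySem.Int.mod l s) (by omega) (by omega) (by omega) (by omega)]
    have hq : -(PySem.Int.floordiv (-l) s) = PySem.Int.floordiv l s + 1 :=
      (PySem.Int.neg_floordiv_neg_eq_iff_of_pos (by omega)).2
        (by constructor <;> nlinarith)
    rw [hq]; omega

-- ===== VERDICT (by name: the statement is the Claim_ definition above) =====
theorem get_left_year_by_max_speed_spec : Claim_equal_get_left_year_by_max_speed := by
  intro l m _
  unfold Spec_get_left_year_by_max_speed get_left_year_by_max_speed get_left_year_by_max_speed_alt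
  by_cases h0 : l ≤ 0 ∨ m ≤ 0
  · rw [if_pos h0]
    rcases h0 with h | h
    · exact goA_nonpos m.toNat l m 0 l le_rfl h
    · rw [goA]; rw [if_neg (by omega)]
  · rw [if_neg (by omega)]
    by_cases hml : m ≤ l
    · rw [min_eq_left hml]
      exact goA_main l m (by omega) (by omega) hml
    · rw [min_eq_right (by omega),
        goA_phase1 m.toNat l m 0 l le_rfl (by omega) (by omega)]
      exact goA_main l l (by omega) (by omega) le_rfl
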